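-- pv_equiv track=rewrite | github.com/Tonball112/FontDiffuser-FYP25 | lantingjixu_grid.py | get_file_names
-- ===== SOURCE A (Python) =====
-- from collections import defaultdict
--
-- def get_file_names(characters: str):
--     word_count = defaultdict(lambda: 0)
--     file_names = []
--     for character in characters:
--         seq = word_count[character]
--         if seq == 0:
--             file_names.append(f"{character}")
--         else:
--             file_names.append(f"{character}+{seq}")
--         word_count[character] += 1
--     return file_names
-- ===== SOURCE B (Python) =====
-- def get_file_names(characters: str):
--     # Group-then-scatter: collect the positions of each character, then write
--     # the name for the k-th occurrence directly into a preallocated output slot.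
--     out = [""] * len(characters)
--     positions = {}
--     for i, c in enumerate(characters):
--         positions.setdefault(c, []).append(i)
--     for c, idxs in positions.items():
--         for k, i in enumerate(idxs):
--             out[i] = c if k == 0 else f"{c}+{k}"
--     return out
-- ===== Notes on version B (the rewrite author's own statement) =====
-- stated objective: alternative
-- what changed: Replaces A's single streaming pass with a maintained per-character counter by a two-phase group-then-scatter algorithm: first build a dict mapping each character to the list of its positions, then for each group write the k-th occurrence's name directly into a preallocated output array by index.
import Mathlib
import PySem

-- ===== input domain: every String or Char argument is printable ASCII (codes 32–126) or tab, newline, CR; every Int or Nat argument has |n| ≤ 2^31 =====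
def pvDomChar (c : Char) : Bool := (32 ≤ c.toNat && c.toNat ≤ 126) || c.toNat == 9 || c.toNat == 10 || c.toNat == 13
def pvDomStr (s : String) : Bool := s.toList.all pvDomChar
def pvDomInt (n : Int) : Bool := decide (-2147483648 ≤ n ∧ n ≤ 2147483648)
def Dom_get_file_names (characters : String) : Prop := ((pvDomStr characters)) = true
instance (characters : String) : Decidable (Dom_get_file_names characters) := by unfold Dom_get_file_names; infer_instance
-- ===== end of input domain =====

-- B replaces A's single streaming pass (maintained per-character counter) by a two-phase
-- group-then-scatter algorithm: a positions dict, then indexed writes into a preallocated list.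

-- ===== PORT A =====
-- state = (word_count, file_names); defaultdict access then '+= 1' nets to insert c (seq + 1)
def get_file_names (characters : String) : List String :=
  (characters.toList.foldl
    (fun (st : PySem.Dict Char Int × List String) c =>
      let seq := st.1.getD c 0
      let names :=
        if seq = 0 then st.2 ++ [String.mk [c]]
        else st.2 ++ [String.mk [c] ++ "+" ++ PySem.Int.toStr seq]
      (st.1.insert c (seq + 1), names))
    (PySem.Dict.empty, [])).2

-- ===== PORT B =====
-- f"{c}" / f"{c}+{k}" choice, shared by both branches of Source B's scatter write
def pvName (c : Char) (k : Int) : String :=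
  if k = 0 then String.mk [c] else String.mk [c] ++ "+" ++ PySem.Int.toStr k


-- 'positions.setdefault(c, []).append(i)' is d[c] = d.get(c, []) + [i], i.e. Dict.modify;
-- 'out[i] = …' is List.set at i.toNat (exact: i comes from enumerate, hence 0 ≤ i)
def get_file_names_alt (characters : String) : List String :=
  let chars := characters.toList
  let out0 : List String := List.replicate chars.length ""
  let positions : PySem.Dict Char (List Int) :=
    (PySem.List.enumerate chars 0).foldl
      (fun d p => d.modify p.2 [] (fun l => l ++ [p.1])) PySem.Dict.empty
  positions.items.foldl
    (fun out ci =>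
      (PySem.List.enumerate ci.2 0).foldl
        (fun out ki => out.set ki.2.toNat (pvName ci.1 ki.1))
        out)
    out0


-- ===== PRECONDITION & SPEC =====
def Spec_get_file_names (characters : String) (out : List String) : Prop := out = get_file_names_alt characters
instance (characters : String) (out : List String) : Decidable (Spec_get_file_names characters out) := by unfold Spec_get_file_names; infer_instance

-- ===== CLAIM (what is proved, stated in full; the proofs are below) =====
def Claim_equal_get_file_names : Prop := ∀ (characters : String), Dom_get_file_names characters → Spec_get_file_names characters (get_file_names characters)

-- ===== LEMMAS AND PROOFS =====

-- the common value: the name of character c after prefix pre has been emitted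
def pvEntry (pre : List Char) (c : Char) : String :=
  let seq : Int := (pre.count c : Int)
  if seq = 0 then String.mk [c] else String.mk [c] ++ "+" ++ PySem.Int.toStr seq

def pvBuild (pre : List Char) : List Char → List String
  | [] => []
  | c :: t => pvEntry pre c :: pvBuild (pre ++ [c]) t

theorem pvA_build (l : List Char) : ∀ (pre : List Char) (d : PySem.Dict Char Int) (acc : List String),
    (∀ x, d.getD x 0 = (pre.count x : Int)) →
    (l.foldl
      (fun (st : PySem.Dict Char Int × List String) c =>
        let seq := st.1.getD c 0
        let names :=
          if seq = 0 then st.2 ++ [String.mk [c]]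
          else st.2 ++ [String.mk [c] ++ "+" ++ PySem.Int.toStr seq]
        (st.1.insert c (seq + 1), names))
      (d, acc)).2 = acc ++ pvBuild pre l := by
  induction l with
  | nil => intro pre d acc hd; simp [pvBuild]
  | cons c t ih =>
    intro pre d acc hd
    have hd2 : ∀ x, (d.insert c (d.getD c 0 + 1)).getD x 0 = ((pre ++ [c]).count x : Int) := by
      intro x
      rw [PySem.Dict.getD_insert, hd x]
      by_cases hx : x = c
      · subst hx; simp [hd x, List.count_append]
      · simp [List.count_append, List.count_cons, hx]
        exact fun h => hx h.symm
    simp only [List.foldl_cons, pvBuild, pvEntry, hd c]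
    split_ifs with h
    · simpa [hd c, h, List.append_assoc] using
        ih (pre ++ [c]) (d.insert c (d.getD c 0 + 1)) (acc ++ [String.mk [c]]) hd2
    · simpa [hd c, h, List.append_assoc] using
        ih (pre ++ [c]) (d.insert c (d.getD c 0 + 1))
          (acc ++ [String.mk [c] ++ "+" ++ PySem.Int.toStr ((pre.count c : Nat) : Int)]) hd2

def pvPos (chars : List Char) (c : Char) (s : Int) : List Int :=
  ((((PySem.List.enumerate chars s).map Prod.swap).filter (fun p => p.1 == c)).map (·.2))

theorem pvPos_nil (c : Char) (s : Int) : pvPos [] c s = [] := by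
  simp [pvPos, PySem.List.enumerate_nil]

theorem pvPos_cons (x : Char) (t : List Char) (c : Char) (s : Int) :
    pvPos (x :: t) c s = (if x = c then [s] else []) ++ pvPos t c (s + 1) := by
  simp only [pvPos, PySem.List.enumerate_cons, List.map_cons, List.filter_cons]
  by_cases h : x = c <;> simp [h, Prod.swap]

theorem pvPos_ge (chars : List Char) (c : Char) : ∀ (s i : Int), i ∈ pvPos chars c s → s ≤ i := by
  induction chars with
  | nil => simp [pvPos_nil]
  | cons x t ih =>
    intro s i hi
    rw [pvPos_cons] at hi
    rcases List.mem_append.1 hi with h | h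
    · split_ifs at h <;> simp at h; omega
    · have := ih (s + 1) i h; omega

theorem pvPos_nodup (chars : List Char) (c : Char) : ∀ (s : Int), (pvPos chars c s).Nodup := by
  induction chars with
  | nil => simp [pvPos_nil]
  | cons x t ih =>
    intro s
    rw [pvPos_cons]
    rcases eq_or_ne x c with h | h
    · simp only [h, if_pos]
      refine List.Nodup.append (by simp) (ih (s + 1)) ?_
      intro a ha hb
      simp only [List.mem_singleton] at ha
      have := pvPos_ge t c (s + 1) a hb
      omega
    · simp [h, ih (s + 1)]

theorem pvPos_mem (chars : List Char) (c : Char) : ∀ (s j : Nat),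
    ((j : Int) ∈ pvPos chars c (s : Int)) ↔ (s ≤ j ∧ j - s < chars.length ∧ chars[j - s]? = some c) := by
  induction chars with
  | nil => intro s j; simp [pvPos_nil]
  | cons x t ih =>
    intro s j
    rw [pvPos_cons, List.mem_append]
    have hcast : (s : Int) + 1 = ((s + 1 : Nat) : Int) := by push_cast; ring
    rw [hcast, ih (s + 1) j]
    by_cases hj : j = s
    · subst hj
      simp only [Nat.sub_self, List.getElem?_cons_zero]
      constructor
      · rintro (h | h)
        · split_ifs at h with hx
          · simp at h; exact ⟨le_refl _, by simp, by simp [hx]⟩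
          · simp at h
        · omega
      · rintro ⟨-, -, hx⟩
        left
        simp at hx
        simp [hx]
    · by_cases hjs : s ≤ j
      · have hlt : s < j := by omega
        have hsub : j - s = (j - (s + 1)) + 1 := by omega
        rw [hsub, List.getElem?_cons_succ]
        constructor
        · rintro (h | h)
          · split_ifs at h with hx <;> simp at h; omega
          · exact ⟨by omega, by simpa using h.2⟩
        · rintro ⟨-, h1, h2⟩
          right; exact ⟨by omega, by simpa using h1, h2⟩
      · constructor
        · rintro (h | h)
          · split_ifs at h with hx <;> simp at h; omega
          · omega
        · rintro ⟨h, -⟩; omega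

theorem pvPos_idxOf (chars : List Char) (c : Char) : ∀ (s j : Nat), s ≤ j →
    chars[j - s]? = some c →
    (pvPos chars c (s : Int)).idxOf (j : Int) = (chars.take (j - s)).count c := by
  induction chars with
  | nil => intro s j _ h; simp at h
  | cons x t ih =>
    intro s j hsj hget
    rw [pvPos_cons]
    have hcast : (s : Int) + 1 = ((s + 1 : Nat) : Int) := by push_cast; ring
    by_cases hj : j = s
    · subst hj
      simp only [Nat.sub_self, List.getElem?_cons_zero, Option.some_inj] at hget
      simp [hget]
    · have hlt : s < j := by omega
      have hsub : j - s = (j - (s + 1)) + 1 := by omega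
      rw [hsub, List.getElem?_cons_succ] at hget
      have hrec := ih (s + 1) j (by omega) hget
      push_cast at hrec
      rw [hsub, List.take_succ_cons, List.count_cons]
      have hne : ((s : Int) == (j : Int)) = false := by
        simp; omega
      by_cases hx : x = c
      · simp [hx, List.idxOf_cons, hne, hrec]
      · simp [hx, hrec]

theorem pvInner_len (c : Char) (idxs : List Int) : ∀ (s : Int) (out : List String),
    ((PySem.List.enumerate idxs s).foldl
      (fun out ki => out.set ki.2.toNat (pvName c ki.1)) out).length = out.length := by
  induction idxs with
  | nil => intro s out; simp [PySem.List.enumerate_nil]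
  | cons i t ih =>
    intro s out
    rw [PySem.List.enumerate_cons]
    simp only [List.foldl_cons]
    rw [ih]
    simp

theorem pvInner_skip (c : Char) (idxs : List Int) : ∀ (s : Int) (out : List String) (j : Nat),
    ((j : Int) ∉ idxs) → (∀ i ∈ idxs, 0 ≤ i) →
    ((PySem.List.enumerate idxs s).foldl
      (fun out ki => out.set ki.2.toNat (pvName c ki.1)) out)[j]? = out[j]? := by
  induction idxs with
  | nil => intro s out j _ _; simp [PySem.List.enumerate_nil]
  | cons i t ih =>
    intro s out j hj hnn
    rw [PySem.List.enumerate_cons]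
    simp only [List.foldl_cons]
    rw [ih (s + 1) _ j (fun h => hj (List.mem_cons_of_mem _ h)) (fun a ha => hnn a (List.mem_cons_of_mem _ ha))]
    apply List.getElem?_set_ne
    have h0 : (0 : Int) ≤ i := hnn i (List.mem_cons_self ..)
    have : (j : Int) ≠ i := fun h => hj (h ▸ List.mem_cons_self ..)
    omega

theorem pvInner_hit (c : Char) (idxs : List Int) : ∀ (s : Int) (out : List String) (j : Nat),
    idxs.Nodup → (∀ i ∈ idxs, 0 ≤ i) → ((j : Int) ∈ idxs) → j < out.length →
    ((PySem.List.enumerate idxs s).foldl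
      (fun out ki => out.set ki.2.toNat (pvName c ki.1)) out)[j]?
      = some (pvName c (s + (idxs.idxOf (j : Int) : Nat))) := by
  induction idxs with
  | nil => intro s out j _ _ h _; simp at h
  | cons i t ih =>
    intro s out j hnd hnn hmem hlen
    rw [PySem.List.enumerate_cons]
    simp only [List.foldl_cons]
    by_cases hij : (j : Int) = i
    · have hjt : (j : Int) ∉ t := by
        intro h; exact (List.nodup_cons.1 hnd).1 (hij ▸ h)
      rw [pvInner_skip c t (s + 1) _ j hjt (fun a ha => hnn a (List.mem_cons_of_mem _ ha))]
      have hji : i.toNat = j := by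
        have h0 : (0 : Int) ≤ i := hnn i (List.mem_cons_self ..)
        omega
      rw [hji]
      rw [List.getElem?_set_self (by omega)]
      simp [hij.symm]
    · have hmt : (j : Int) ∈ t := by
        rcases List.mem_cons.1 hmem with h | h
        · exact absurd h hij
        · exact h
      rw [ih (s + 1) _ j (List.nodup_cons.1 hnd).2 (fun a ha => hnn a (List.mem_cons_of_mem _ ha)) hmt (by simpa using hlen)]
      have hbe : (i == (j : Int)) = false := by simp; omega
      simp [List.idxOf_cons, hbe]
      ring_nf

theorem pvBuild_len (l : List Char) : ∀ pre, (pvBuild pre l).length = l.length := by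
  induction l with
  | nil => intro pre; simp [pvBuild]
  | cons c t ih => intro pre; simp [pvBuild, ih]

theorem pvBuild_get (l : List Char) : ∀ (pre : List Char) (j : Nat), j < l.length →
    (pvBuild pre l)[j]? = (l[j]?).map (fun c => pvEntry (pre ++ l.take j) c) := by
  induction l with
  | nil => intro pre j h; simp at h
  | cons c t ih =>
    intro pre j h
    cases j with
    | zero => simp [pvBuild]
    | succ j =>
      simp only [pvBuild, List.getElem?_cons_succ, List.take_succ_cons]
      rw [ih (pre ++ [c]) j (by simpa using h)]
      simp

theorem pvOuter_len (chars : List Char) (cs : List Char) : ∀ (out : List String),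
    (cs.foldl (fun out c =>
        (PySem.List.enumerate (pvPos chars c 0) 0).foldl
          (fun out ki => out.set ki.2.toNat (pvName c ki.1)) out) out).length = out.length := by
  induction cs with
  | nil => intro out; simp
  | cons c0 cs' ih =>
    intro out
    simp only [List.foldl_cons]
    rw [ih, pvInner_len]

theorem pvOuter_get (chars : List Char) (cs : List Char) : ∀ (out : List String), cs.Nodup →
    out.length = chars.length →
    ∀ (j : Nat) (cj : Char), chars[j]? = some cj →
    (cs.foldl (fun out c =>
        (PySem.List.enumerate (pvPos chars c 0) 0).foldl
          (fun out ki => out.set ki.2.toNat (pvName c ki.1)) out) out)[j]?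
      = if cj ∈ cs then some (pvEntry (chars.take j) cj) else out[j]? := by
  induction cs with
  | nil => intro out _ _ j cj _; simp
  | cons c0 cs' ih =>
    intro out hnd hlen j cj hget
    have hj : j < chars.length := by
      by_contra h
      rw [List.getElem?_eq_none (by omega)] at hget
      simp at hget
    have hnn : ∀ i ∈ pvPos chars c0 0, (0 : Int) ≤ i := by
      intro i hi
      exact pvPos_ge chars c0 0 i hi
    simp only [List.foldl_cons]
    by_cases hc : cj = c0
    · subst hc
      have hmem : (j : Int) ∈ pvPos chars cj ((0 : Nat) : Int) := by
        rw [pvPos_mem]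
        exact ⟨Nat.zero_le _, by simpa using hj, by simpa using hget⟩
      have hnotin : cj ∉ cs' := (List.nodup_cons.1 hnd).1
      rw [ih _ (List.nodup_cons.1 hnd).2 (by rw [pvInner_len]; exact hlen) j cj hget,
          if_neg hnotin]
      rw [pvInner_hit cj (pvPos chars cj 0) 0 out j (pvPos_nodup chars cj 0) hnn
            (by simpa using hmem) (by omega)]
      have hidx := pvPos_idxOf chars cj 0 j (Nat.zero_le _) (by simpa using hget)
      simp only [Nat.sub_zero] at hidx
      rw [if_pos (List.mem_cons_self ..)]
      simp only [Nat.cast_zero] at hidx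
      rw [hidx]
      simp [pvName, pvEntry]
    · have hnotmem : (j : Int) ∉ pvPos chars c0 ((0 : Nat) : Int) := by
        rw [pvPos_mem]
        rintro ⟨-, -, h⟩
        simp only [Nat.sub_zero] at h
        rw [hget] at h
        exact hc (Option.some_inj.1 h)
      rw [ih _ (List.nodup_cons.1 hnd).2 (by rw [pvInner_len]; exact hlen) j cj hget]
      rw [pvInner_skip c0 (pvPos chars c0 0) 0 out j (by simpa using hnotmem) hnn]
      simp [List.mem_cons, hc]

theorem pvDict_keys (chars : List Char) :
    ((PySem.List.enumerate chars 0).foldl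
      (fun d p => d.modify p.2 [] (fun l => l ++ [p.1])) PySem.Dict.empty).keys
      = PySem.Set.ofList chars := by
  rw [PySem.Dict.keys_foldl_modify_key (PySem.List.enumerate chars 0) Prod.snd]
  rw [PySem.List.map_snd_enumerate]
  rw [PySem.Dict.keys_empty]
  rfl

theorem pvDict_nodup (chars : List Char) :
    ((PySem.List.enumerate chars 0).foldl
      (fun d p => d.modify p.2 [] (fun l => l ++ [p.1])) PySem.Dict.empty).keys.Nodup := by
  exact PySem.Dict.nodup_keys_foldl_modify_key _ Prod.snd _ _ _ (by simp [PySem.Dict.keys_empty])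

theorem pvDict_getD (chars : List Char) (c : Char) :
    ((PySem.List.enumerate chars 0).foldl
      (fun d p => d.modify p.2 [] (fun l => l ++ [p.1])) PySem.Dict.empty).getD c []
      = pvPos chars c 0 := by
  have hfold : (PySem.List.enumerate chars 0).foldl
      (fun d p => d.modify p.2 [] (fun l => l ++ [p.1])) PySem.Dict.empty
      = ((PySem.List.enumerate chars 0).map Prod.swap).foldl
        (fun d p => d.modify p.1 [] (fun l => l ++ [p.2])) PySem.Dict.empty := by
    rw [List.foldl_map]; rfl
  rw [hfold, PySem.Dict.getD_foldl_modify_append]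
  simp [PySem.Dict.getD_empty, pvPos]

theorem pvDict_items (chars : List Char) :
    ((PySem.List.enumerate chars 0).foldl
      (fun d p => d.modify p.2 [] (fun l => l ++ [p.1])) PySem.Dict.empty).items
      = (PySem.Set.ofList chars).map (fun c => (c, pvPos chars c 0)) := by
  rw [PySem.Dict.items_eq_map_keys _ (pvDict_nodup chars) []]
  rw [pvDict_keys]
  apply List.map_congr_left
  intro c _
  rw [pvDict_getD]

theorem pvB_eq (characters : String) :
    get_file_names_alt characters = pvBuild [] characters.toList := by
  simp only [get_file_names_alt]
  rw [pvDict_items, List.foldl_map]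
  apply List.ext_getElem?
  intro j
  by_cases hj : j < characters.toList.length
  · obtain ⟨cj, hcj⟩ : ∃ cj, characters.toList[j]? = some cj :=
      ⟨characters.toList[j], List.getElem?_eq_getElem hj⟩
    rw [pvOuter_get characters.toList (PySem.Set.ofList characters.toList) _
          (PySem.Set.nodup_ofList characters.toList) (List.length_replicate ..) j cj hcj]
    rw [if_pos (by rw [PySem.Set.mem_ofList]; exact List.mem_of_getElem? hcj)]
    rw [pvBuild_get characters.toList [] j hj, hcj]
    simp
  · rw [List.getElem?_eq_none (by rw [pvOuter_len, List.length_replicate]; omega),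
        List.getElem?_eq_none (by rw [pvBuild_len]; omega)]

-- ===== VERDICT (by name: the statement is the Claim_ definition above) =====
theorem get_file_names_spec : Claim_equal_get_file_names := by
  intro characters _
  unfold Spec_get_file_names get_file_names
  rw [pvA_build _ [] PySem.Dict.empty [] (by intro x; simp [PySem.Dict.getD_empty])]
  rw [pvB_eq]
  simp
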